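-- pv_equiv track=rewrite | github.com/Reinsdyret/uib-notes | INF237/weeks/week10/paintball/solution_copy.py | assign_targets
-- ===== SOURCE A (Python) =====
-- def find_path(graph, current, visited):
--     visited[current] = True
--     if current == 't':
--         return True
--     for neighbor in graph[current]:
--         if not visited[neighbor]:
--             if find_path(graph, neighbor, visited):
--                 return True
--     return False
--
-- def assign_targets(n, m, edges):
--     graph = {'s': [], 't': []}
--     for v in range(1, n + 1):
--         graph['s'].append(v)
--         graph[v] = []
--         graph[str(v)] = ['t']
--     for a, b in edges:
--         graph[a].append(str(b))
--         graph[b].append(str(a))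
--     visited = {node: False for node in graph}
--     if find_path(graph, 's', visited):
--         targets = [int(node) for node in visited if visited[node] and type(node) == int]
--         if len(targets) == n:
--             return "\n".join(map(str, targets))
--     return "Impossible"
-- ===== SOURCE B (Python) =====
-- def assign_targets(n, m, edges):
--     graph = {'s': list(range(1, n + 1)), 't': []}
--     for v in range(1, n + 1):
--         graph[v] = []
--         graph[str(v)] = ['t']
--     for a, b in edges:
--         graph[a].append(str(b))
--         graph[b].append(str(a))
--     # iterative DFS from 's' with an explicit stack of neighbour iterators
--     visited = {'s'}
--     stack = [iter(graph['s'])]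
--     reached = False
--     while stack:
--         node = next(stack[-1], None)
--         if node is None:
--             stack.pop()
--         elif node not in visited:
--             visited.add(node)
--             if node == 't':
--                 reached = True
--                 break
--             stack.append(iter(graph[node]))
--     if reached:
--         targets = sorted(v for v in visited if isinstance(v, int))
--         if len(targets) == n:
--             return "\n".join(map(str, targets))
--     return "Impossible"
-- ===== Notes on version B (the rewrite author's own statement) =====
-- stated objective: alternative
-- what changed: Replaces the recursive find_path DFS threading a node->bool visited dict by an iterative DFS with an explicit stack of neighbour iterators and a visited set, collecting the integer targets by sorting instead of dict-iteration order; Pre_ excludes inputs where an edge endpoint lies outside 1..n, on which A raises KeyError while building the graph.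
import Mathlib
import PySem

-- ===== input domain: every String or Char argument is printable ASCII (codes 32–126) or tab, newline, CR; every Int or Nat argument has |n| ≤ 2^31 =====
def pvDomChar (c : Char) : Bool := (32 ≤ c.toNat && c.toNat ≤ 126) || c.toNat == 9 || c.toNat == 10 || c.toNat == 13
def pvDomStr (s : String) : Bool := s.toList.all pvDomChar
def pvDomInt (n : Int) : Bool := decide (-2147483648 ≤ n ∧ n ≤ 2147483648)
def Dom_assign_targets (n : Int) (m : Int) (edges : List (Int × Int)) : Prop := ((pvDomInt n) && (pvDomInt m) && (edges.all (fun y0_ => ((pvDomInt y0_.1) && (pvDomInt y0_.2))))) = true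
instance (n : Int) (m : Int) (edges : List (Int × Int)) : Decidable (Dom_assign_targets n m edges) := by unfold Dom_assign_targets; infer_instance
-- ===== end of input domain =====

-- B replaces A's recursive DFS by an iterative DFS with an explicit stack of
-- neighbour iterators and a visited set (targets collected by sorting), an
-- alternative decomposition of the same search; equivalence proved on Pre_
-- (A raises KeyError outside it).

-- ===== PORT A =====
-- Python dict keys are a mix of ints and strings ('s', 't', str(v)): model them
-- as a two-constructor inductive.
inductive PKey where
  | i : Int → PKey
  | s : String → PKey
deriving DecidableEq, Repr, Hashable

-- A Python dict, modelled as a hash map together with its insertion-order key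
-- list.  The key list is kept in REVERSE insertion order (a fresh key is consed)
-- and reversed where Python iterates the dict; list values (the adjacency lists)
-- are likewise kept reversed, so that 'graph[k].append(x)' is a cons, and are
-- reversed where Python iterates them.  This keeps the port linear-time; each
-- Python dict/list operation corresponds to exactly one operation here.
abbrev PyDict (ν : Type) : Type := Std.HashMap PKey ν × List PKey

-- d[k] = v  (the map is let-bound so that it stays uniquely referenced and the
-- insert can update in place)
def dset {ν : Type} (d : PyDict ν) (k : PKey) (v : ν) : PyDict ν :=
  let m := d.1
  let ks := if m.contains k then d.2 else k :: d.2
  (m.insert k v, ks)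

-- d[k].append(x) (list values stored reversed); Python raises KeyError when k
-- is absent — those inputs are excluded by Pre_ below, the port leaves d as is
def dappend (d : PyDict (List PKey)) (k : PKey) (x : PKey) : PyDict (List PKey) :=
  let m := d.1
  let ks := d.2
  match m[k]? with
  | some l => (m.insert k (x :: l), ks)
  | none => (m, ks)

mutual
-- literal port of find_path; the Nat fuel only makes the recursion structurally
-- terminating (it is never exhausted on the dicts assign_targets builds)
def find_path (graph : Std.HashMap PKey (List PKey)) (fuel : Nat) (current : PKey)
    (visited : PyDict Bool) : Bool × PyDict Bool :=
  match fuel with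
  | 0 => (false, visited)
  | fuel' + 1 =>
    let visited := dset visited current true
    if current = PKey.s "t" then (true, visited)
    else find_loop graph fuel' ((graph.getD current []).reverse) visited
termination_by (fuel, 0)

-- the 'for neighbor in graph[current]' loop of find_path, threading the mutated visited dict
def find_loop (graph : Std.HashMap PKey (List PKey)) (fuel : Nat) (l : List PKey)
    (visited : PyDict Bool) : Bool × PyDict Bool :=
  match l with
  | [] => (false, visited)
  | neighbor :: rest =>
    if !(visited.1.getD neighbor false) then
      let res := find_path graph fuel neighbor visited
      if res.1 then (true, res.2)
      else find_loop graph fuel rest res.2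
    else find_loop graph fuel rest visited
termination_by (fuel, l.length + 1)
end

def assign_targets (n : Int) (m : Int) (edges : List (Int × Int)) : String :=
  let graph : PyDict (List PKey) :=
    dset (dset ((∅ : Std.HashMap PKey (List PKey)), ([] : List PKey)) (PKey.s "s") [])
      (PKey.s "t") []
  let graph := (PySem.List.pyRange 1 (n + 1) 1).foldl (fun g v =>
      dset (dset (dappend g (PKey.s "s") (PKey.i v)) (PKey.i v) [])
        (PKey.s (PySem.Int.toStr v)) [PKey.s "t"]) graph
  let graph := edges.foldl (fun g e =>
      dappend (dappend g (PKey.i e.1) (PKey.s (PySem.Int.toStr e.2)))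
        (PKey.i e.2) (PKey.s (PySem.Int.toStr e.1))) graph
  let visited : PyDict Bool :=
    (graph.2.reverse).foldl (fun d node => dset d node false)
      ((∅ : Std.HashMap PKey Bool), ([] : List PKey))
  match find_path graph.1 (graph.2.length + 1) (PKey.s "s") visited with
  | (true, visited') =>
    let targets : List Int := (visited'.2.reverse).filterMap (fun node =>
      if visited'.1.getD node false then
        match node with
        | PKey.i v => some v
        | PKey.s _ => none
      else none)
    if (targets.length : Int) = n then
      String.intercalate "\n" (targets.map PySem.Int.toStr)
    else "Impossible"
  | (false, _) => "Impossible"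

-- ===== PORT B =====
-- type(node) == int / isinstance(v, int): the integer-keyed elements
def inlProj : PKey → Option Int
  | PKey.i v => some v
  | PKey.s _ => none

-- the 'while stack:' loop of Source B: the stack holds, for each frame, the list of
-- neighbours its iterator has not yet yielded (top of stack first); the fuel is
-- only a structural-termination device, never exhausted on the graphs built below
def bLoop (G : Std.HashMap PKey (List PKey)) (fuel : Nat)
    (stack : List (List PKey)) (visited : PySem.Set PKey) : Bool × PySem.Set PKey :=
  match fuel with
  | 0 => (false, visited)
  | fuel' + 1 =>
    match stack with
    | [] => (false, visited)
    | frame :: rest =>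
      match frame with
      | [] => bLoop G fuel' rest visited            -- StopIteration: stack.pop()
      | node :: frest =>
        if PySem.Set.contains visited node then bLoop G fuel' (frest :: rest) visited
        else
          let visited := PySem.Set.add visited node
          if node = PKey.s "t" then (true, visited)
          else bLoop G fuel' ((G.getD node []).reverse :: frest :: rest) visited

def assign_targets_alt (n : Int) (m : Int) (edges : List (Int × Int)) : String :=
  let rng := PySem.List.pyRange 1 (n + 1) 1
  -- graph construction as in Source B; adjacency lists stored reversed (append = cons)
  let graph : PyDict (List PKey) :=
    dset (dset ((∅ : Std.HashMap PKey (List PKey)), ([] : List PKey))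
      (PKey.s "s") ((rng.map PKey.i).reverse)) (PKey.s "t") []
  let graph := rng.foldl (fun g v =>
      dset (dset g (PKey.i v) []) (PKey.s (PySem.Int.toStr v)) [PKey.s "t"]) graph
  let graph := edges.foldl (fun g e =>
      dappend (dappend g (PKey.i e.1) (PKey.s (PySem.Int.toStr e.2)))
        (PKey.i e.2) (PKey.s (PySem.Int.toStr e.1))) graph
  let visited : PySem.Set PKey := PySem.Set.add PySem.Set.empty (PKey.s "s")
  match bLoop graph.1 (2 * rng.length + 5) [((graph.1.getD (PKey.s "s") []).reverse)] visited with
  | (true, vis) =>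
    let targets : List Int := PySem.List.sorted (vis.filterMap inlProj) (fun x => x) false
    if (targets.length : Int) = n then
      String.intercalate "\n" (targets.map PySem.Int.toStr)
    else "Impossible"
  | (false, _) => "Impossible"

-- ===== PRECONDITION & SPEC =====
-- Pre_ excludes exactly the inputs on which A raises KeyError: an edge endpoint
-- outside 1..n is not a key of A's graph dict.
def Pre_assign_targets (n : Int) (m : Int) (edges : List (Int × Int)) : Prop :=
  ∀ e ∈ edges, (1 ≤ e.1 ∧ e.1 ≤ n) ∧ (1 ≤ e.2 ∧ e.2 ≤ n)
instance (n : Int) (m : Int) (edges : List (Int × Int)) : Decidable (Pre_assign_targets n m edges) := by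
  unfold Pre_assign_targets; infer_instance

def pvWitness_assign_targets : Int × Int × (List (Int × Int)) := (3, 1, [(3, 3)])

def Spec_assign_targets (n : Int) (m : Int) (edges : List (Int × Int)) (out : String) : Prop :=
  out = assign_targets_alt n m edges
instance (n : Int) (m : Int) (edges : List (Int × Int)) (out : String) :
    Decidable (Spec_assign_targets n m edges out) := by unfold Spec_assign_targets; infer_instance

-- ===== CLAIM (what is proved, stated in full; the proofs are below) =====
def Claim_equal_assign_targets : Prop := ∀ (n : Int) (m : Int) (edges : List (Int × Int)), Dom_assign_targets n m edges → Pre_assign_targets n m edges → Spec_assign_targets n m edges (assign_targets n m edges)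

-- ===== LEMMAS AND PROOFS =====

-- abbreviations for the two string keys
abbrev sK : PKey := PKey.s "s"
abbrev tK : PKey := PKey.s "t"

def L (n : Int) : List Int := PySem.List.pyRange 1 (n + 1) 1

def step1 (g : PyDict (List PKey)) (v : Int) : PyDict (List PKey) :=
  dset (dset (dappend g sK (PKey.i v)) (PKey.i v) []) (PKey.s (PySem.Int.toStr v)) [tK]

def gInit : PyDict (List PKey) :=
  dset (dset ((∅ : Std.HashMap PKey (List PKey)), ([] : List PKey)) sK []) tK []

def g1 (n : Int) : PyDict (List PKey) := (L n).foldl step1 gInit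

def pairsOf (edges : List (Int × Int)) : List (PKey × PKey) :=
  edges.flatMap (fun e => [(PKey.i e.1, PKey.s (PySem.Int.toStr e.2)),
                           (PKey.i e.2, PKey.s (PySem.Int.toStr e.1))])

def g2 (n : Int) (edges : List (Int × Int)) : PyDict (List PKey) :=
  (pairsOf edges).foldl (fun d p => dappend d p.1 p.2) (g1 n)

def vis0 (n : Int) (edges : List (Int × Int)) : PyDict Bool :=
  ((g2 n edges).2.reverse).foldl (fun d node => dset d node false)
    ((∅ : Std.HashMap PKey Bool), ([] : List PKey))

def adjOf (edges : List (Int × Int)) (v : Int) : List PKey :=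
  ((pairsOf edges).filter (fun p => p.1 == PKey.i v)).map (fun p => p.2)

def epred (edges : List (Int × Int)) (v : Int) : Bool :=
  edges.any (fun e => e.1 == v || e.2 == v)

def markTrue (d : PyDict Bool) (ks : List PKey) : PyDict Bool :=
  ks.foldl (fun d k => dset d k true) d

def isSKey : PKey → Bool
  | PKey.i _ => false
  | PKey.s _ => true

-- a dict is well-formed when its key list carries exactly its keys
def wfD {ν : Type} (d : PyDict ν) : Prop := ∀ x : PKey, d.1.contains x = true ↔ x ∈ d.2

-- the common closed form both ports are proved equal to
def C (n : Int) (edges : List (Int × Int)) : String :=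
  match (L n).find? (fun v => epred edges v) with
  | some k =>
    if k = n then String.intercalate "\n" ((L n).map PySem.Int.toStr) else "Impossible"
  | none => "Impossible"

lemma bfalse {b : Bool} (h : ¬ b = true) : b = false := by
  cases b
  · rfl
  · exact absurd rfl h

-- ---- basic dset/dappend lemmas ----
lemma dset_getD {ν : Type} (d : PyDict ν) (k k' : PKey) (v f : ν) :
    (dset d k v).1.getD k' f = if k' = k then v else d.1.getD k' f := by
  show (d.1.insert k v).getD k' f = _
  rw [Std.HashMap.getD_insert]
  by_cases h : k' = k
  · subst h; simp
  · rw [if_neg (by simp only [beq_iff_eq]; exact Ne.symm h), if_neg h]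

lemma dset_contains {ν : Type} (d : PyDict ν) (k k' : PKey) (v : ν) :
    (dset d k v).1.contains k' = (decide (k' = k) || d.1.contains k') := by
  show (d.1.insert k v).contains k' = _
  rw [Std.HashMap.contains_insert]
  by_cases h : k' = k
  · subst h; simp
  · have h1 : (k == k') = false := by
      simp only [beq_eq_false_iff_ne]
      exact Ne.symm h
    rw [h1]
    simp [h]

lemma dset_snd {ν : Type} (d : PyDict ν) (k : PKey) (v : ν) :
    (dset d k v).2 = if d.1.contains k then d.2 else k :: d.2 := rfl

lemma hm_getD_getElem {ν : Type} (m : Std.HashMap PKey ν) (k : PKey) (l : ν) (f : ν)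
    (h : m[k]? = some l) : m.getD k f = l := by
  rw [Std.HashMap.getD_eq_getD_getElem?, h]
  rfl

lemma dappend_matchform (d : PyDict (List PKey)) (k x : PKey) :
    dappend d k x = match d.1[k]? with
      | some l => (d.1.insert k (x :: l), d.2)
      | none => (d.1, d.2) := rfl

lemma dappend_snd (d : PyDict (List PKey)) (k x : PKey) : (dappend d k x).2 = d.2 := by
  rw [dappend_matchform]
  cases h : d.1[k]? <;> rfl

lemma dappend_contains (d : PyDict (List PKey)) (k x k' : PKey) :
    (dappend d k x).1.contains k' = d.1.contains k' := by
  rw [dappend_matchform]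
  cases h : d.1[k]? with
  | none => rfl
  | some l =>
    show (d.1.insert k (x :: l)).contains k' = _
    rw [Std.HashMap.contains_insert]
    by_cases hkk : k = k'
    · subst hkk
      simp [Std.HashMap.contains_eq_isSome_getElem?, h]
    · simp [hkk]

lemma dappend_getD_self (d : PyDict (List PKey)) (k x : PKey) (h : d.1.contains k = true) :
    (dappend d k x).1.getD k [] = x :: d.1.getD k [] := by
  rw [dappend_matchform]
  cases hg : d.1[k]? with
  | none =>
    rw [Std.HashMap.contains_eq_isSome_getElem?, hg] at h
    simp at h
  | some l =>
    show (d.1.insert k (x :: l)).getD k [] = _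
    rw [Std.HashMap.getD_insert]
    simp [hm_getD_getElem d.1 k l [] hg]

lemma dappend_getD_ne (d : PyDict (List PKey)) (k x k' : PKey) (h : k' ≠ k) :
    (dappend d k x).1.getD k' [] = d.1.getD k' [] := by
  rw [dappend_matchform]
  cases hg : d.1[k]? with
  | none => rfl
  | some l =>
    show (d.1.insert k (x :: l)).getD k' [] = _
    rw [Std.HashMap.getD_insert]
    rw [if_neg (by simp only [beq_iff_eq]; exact Ne.symm h)]

lemma wf_dset {ν : Type} (d : PyDict ν) (k : PKey) (v : ν) (hw : wfD d) : wfD (dset d k v) := by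
  intro x
  rw [dset_contains, dset_snd]
  by_cases hx : x = k
  · subst hx
    by_cases hc : d.1.contains x = true
    · simp [hc, (hw x).mp hc]
    · simp [bfalse hc]
  · by_cases hc : d.1.contains k = true
    · simp [hx, hc, hw x]
    · simp [hx, bfalse hc, hw x]

lemma wf_dappend (d : PyDict (List PKey)) (k x : PKey) (hw : wfD d) : wfD (dappend d k x) := by
  intro y
  rw [dappend_contains, dappend_snd]
  exact hw y

lemma nodup_dset {ν : Type} (d : PyDict ν) (k : PKey) (v : ν) (hw : wfD d)
    (hnd : d.2.Nodup) : (dset d k v).2.Nodup := by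
  rw [dset_snd]
  by_cases hc : d.1.contains k = true
  · simp [hc, hnd]
  · rw [if_neg (by simp [bfalse hc])]
    exact List.nodup_cons.mpr ⟨fun hmem => hc ((hw k).mpr hmem), hnd⟩

-- ---- digit facts for str(v) ----
lemma digitChar_lt (m : Nat) (h : m < 10) : (Nat.digitChar m).toNat < 58 := by
  interval_cases m <;> decide

lemma toDigitsCore_mem (fuel : Nat) : ∀ (n : Nat) (ds : List Char) (c : Char),
    c ∈ Nat.toDigitsCore 10 fuel n ds → c ∈ ds ∨ c.toNat < 58 := by
  induction fuel with
  | zero => intro n ds c h; simp only [Nat.toDigitsCore] at h; exact Or.inl h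
  | succ f ih =>
    intro n ds c h
    simp only [Nat.toDigitsCore] at h
    by_cases hq : n / 10 = 0
    · rw [if_pos hq] at h
      rcases List.mem_cons.mp h with h1 | h1
      · exact Or.inr (h1 ▸ digitChar_lt _ (Nat.mod_lt _ (by norm_num)))
      · exact Or.inl h1
    · rw [if_neg hq] at h
      rcases ih _ _ _ h with h1 | h1
      · rcases List.mem_cons.mp h1 with h2 | h2
        · exact Or.inr (h2 ▸ digitChar_lt _ (Nat.mod_lt _ (by norm_num)))
        · exact Or.inl h2
      · exact Or.inr h1

lemma toStr_toList_digits (v : Int) (hv : 1 ≤ v) :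
    ∀ c ∈ (PySem.Int.toStr v).toList, c.toNat < 58 := by
  intro c hc
  rw [PySem.Int.toList_toStr] at hc
  have hneg : ¬ v < 0 := by omega
  simp only [PySem.Int.toChars, if_neg hneg] at hc
  simp only [Nat.toDigits] at hc
  rcases toDigitsCore_mem _ _ _ _ hc with h | h
  · simp at h
  · exact h

lemma toStr_ne_s (v : Int) (hv : 1 ≤ v) : PySem.Int.toStr v ≠ "s" := by
  intro h
  have h2 := toStr_toList_digits v hv 's' (by rw [h]; decide)
  exact absurd h2 (by decide)

lemma toStr_ne_t (v : Int) (hv : 1 ≤ v) : PySem.Int.toStr v ≠ "t" := by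
  intro h
  have h2 := toStr_toList_digits v hv 't' (by rw [h]; decide)
  exact absurd h2 (by decide)

-- ---- adjacency facts ----
lemma adj_nil_iff (edges : List (Int × Int)) (v : Int) :
    adjOf edges v = [] ↔ epred edges v = false := by
  unfold adjOf epred
  rw [List.map_eq_nil_iff, List.filter_eq_nil_iff, List.any_eq_false]
  constructor
  · intro h e he
    have h1 := h (PKey.i e.1, PKey.s (PySem.Int.toStr e.2))
      (List.mem_flatMap.mpr ⟨e, he, by simp [pairsOf]⟩)
    have h2 := h (PKey.i e.2, PKey.s (PySem.Int.toStr e.1))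
      (List.mem_flatMap.mpr ⟨e, he, by simp [pairsOf]⟩)
    simp only [beq_iff_eq, PKey.i.injEq] at h1 h2
    simp only [Bool.or_eq_true, beq_iff_eq]
    push_neg
    exact ⟨fun hh => h1 (by simp [hh]), fun hh => h2 (by simp [hh])⟩
  · intro h p hp
    rcases List.mem_flatMap.mp hp with ⟨e, he, hpe⟩
    have he2 := h e he
    simp only [Bool.or_eq_true, beq_iff_eq] at he2
    push_neg at he2
    rcases (by simpa using hpe : p = (PKey.i e.1, PKey.s (PySem.Int.toStr e.2)) ∨
        p = (PKey.i e.2, PKey.s (PySem.Int.toStr e.1))) with rfl | rfl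
    · simp [he2.1]
    · simp [he2.2]

lemma adj_mem (edges : List (Int × Int)) (v : Int) (x : PKey) (hx : x ∈ adjOf edges v) :
    ∃ w, (∃ e ∈ edges, w = e.1 ∨ w = e.2) ∧ x = PKey.s (PySem.Int.toStr w) := by
  unfold adjOf at hx
  rcases List.mem_map.mp hx with ⟨p, hp, rfl⟩
  rcases List.mem_filter.mp hp with ⟨hpmem, _⟩
  rcases List.mem_flatMap.mp hpmem with ⟨e, he, hpe⟩
  rcases (by simpa using hpe : p = (PKey.i e.1, PKey.s (PySem.Int.toStr e.2)) ∨
      p = (PKey.i e.2, PKey.s (PySem.Int.toStr e.1))) with rfl | rfl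
  · exact ⟨e.2, ⟨e, he, Or.inr rfl⟩, rfl⟩
  · exact ⟨e.1, ⟨e, he, Or.inl rfl⟩, rfl⟩

-- ---- stage-2 facts ----
lemma s2_snd (pairs : List (PKey × PKey)) : ∀ (g : PyDict (List PKey)),
    (pairs.foldl (fun d p => dappend d p.1 p.2) g).2 = g.2 := by
  induction pairs with
  | nil => intro g; rfl
  | cons p ps ih =>
    intro g
    simp only [List.foldl_cons]
    rw [ih, dappend_snd]

lemma s2_getD_str (pairs : List (PKey × PKey)) (hall : ∀ p ∈ pairs, ∃ u, p.1 = PKey.i u) :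
    ∀ (g : PyDict (List PKey)) (str : String),
    (pairs.foldl (fun d p => dappend d p.1 p.2) g).1.getD (PKey.s str) [] =
      g.1.getD (PKey.s str) [] := by
  induction pairs with
  | nil => intro g str; rfl
  | cons p ps ih =>
    intro g str
    simp only [List.foldl_cons]
    rw [ih (fun q hq => hall q (by simp [hq])) _ str]
    rcases hall p (by simp) with ⟨u, hu⟩
    exact dappend_getD_ne _ _ _ _ (by simp [hu])

lemma s2_getD_int (pairs : List (PKey × PKey)) : ∀ (g : PyDict (List PKey)) (v : Int),
    (∀ p ∈ pairs, g.1.contains p.1 = true) →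
    (pairs.foldl (fun d p => dappend d p.1 p.2) g).1.getD (PKey.i v) [] =
      ((pairs.filter (fun p => p.1 == PKey.i v)).map (fun p => p.2)).reverse ++
        g.1.getD (PKey.i v) [] := by
  induction pairs with
  | nil => intro g v _; simp
  | cons p ps ih =>
    intro g v hcon
    obtain ⟨p1, p2⟩ := p
    simp only [List.foldl_cons]
    rw [ih _ v (fun q hq => by rw [dappend_contains]; exact hcon q (by simp [hq]))]
    by_cases hp : p1 = PKey.i v
    · subst hp
      rw [dappend_getD_self _ _ _ (hcon (PKey.i v, p2) (by simp))]
      rw [List.filter_cons_of_pos (by simp)]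
      simp
    · rw [dappend_getD_ne _ _ _ _ (fun hh => hp hh.symm)]
      rw [List.filter_cons_of_neg (by simp [hp])]

-- ---- stage-1 facts (port A's construction loop) ----
lemma step1_contains_mono (g : PyDict (List PKey)) (v : Int) (x : PKey)
    (h : g.1.contains x = true) : (step1 g v).1.contains x = true := by
  unfold step1
  rw [dset_contains, dset_contains, dappend_contains, h]
  simp

lemma s1_contains_mono (Lst : List Int) : ∀ (g : PyDict (List PKey)) (x : PKey),
    g.1.contains x = true → (Lst.foldl step1 g).1.contains x = true := by
  induction Lst with
  | nil => intro g x h; exact h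
  | cons v rest ih =>
    intro g x h
    simp only [List.foldl_cons]
    exact ih _ x (step1_contains_mono g v x h)

lemma s1_contains_i (Lst : List Int) : ∀ (g : PyDict (List PKey)) (v : Int), v ∈ Lst →
    (Lst.foldl step1 g).1.contains (PKey.i v) = true := by
  induction Lst with
  | nil => intro g v h; simp at h
  | cons u rest ih =>
    intro g v hv
    simp only [List.foldl_cons]
    rcases List.mem_cons.mp hv with rfl | hvr
    · apply s1_contains_mono
      unfold step1
      rw [dset_contains, dset_contains]
      simp
    · exact ih _ v hvr

lemma s1_contains_str (Lst : List Int) : ∀ (g : PyDict (List PKey)) (w : Int), w ∈ Lst →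
    (Lst.foldl step1 g).1.contains (PKey.s (PySem.Int.toStr w)) = true := by
  induction Lst with
  | nil => intro g w h; simp at h
  | cons u rest ih =>
    intro g w hw
    simp only [List.foldl_cons]
    rcases List.mem_cons.mp hw with rfl | hwr
    · apply s1_contains_mono
      unfold step1
      rw [dset_contains]
      simp
    · exact ih _ w hwr

lemma s1_wf (Lst : List Int) : ∀ (g : PyDict (List PKey)), wfD g →
    wfD (Lst.foldl step1 g) := by
  induction Lst with
  | nil => intro g h; exact h
  | cons v rest ih =>
    intro g h
    simp only [List.foldl_cons]
    exact ih _ (wf_dset _ _ _ (wf_dset _ _ _ (wf_dappend _ _ _ h)))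

lemma s1_nodup (Lst : List Int) : ∀ (g : PyDict (List PKey)), wfD g → g.2.Nodup →
    (Lst.foldl step1 g).2.Nodup := by
  induction Lst with
  | nil => intro g _ h; exact h
  | cons v rest ih =>
    intro g hw h
    simp only [List.foldl_cons]
    have hw1 : wfD (dappend g sK (PKey.i v)) := wf_dappend _ _ _ hw
    have hn1 : (dappend g sK (PKey.i v)).2.Nodup := by rw [dappend_snd]; exact h
    exact ih _ (wf_dset _ _ _ (wf_dset _ _ _ hw1))
      (nodup_dset _ _ _ (wf_dset _ _ _ hw1) (nodup_dset _ _ _ hw1 hn1))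

lemma s1_getD_s (Lst : List Int) : ∀ (g : PyDict (List PKey)), (∀ u ∈ Lst, 1 ≤ u) →
    g.1.contains sK = true →
    ((Lst.foldl step1 g).1.getD sK [] = (Lst.map PKey.i).reverse ++ g.1.getD sK []) := by
  induction Lst with
  | nil => intro g _ _; simp
  | cons v rest ih =>
    intro g hL hc
    have hv : 1 ≤ v := hL v (by simp)
    simp only [List.foldl_cons]
    rw [ih _ (fun u hu => hL u (by simp [hu])) (step1_contains_mono g v sK hc)]
    have hstep : (step1 g v).1.getD sK [] = PKey.i v :: g.1.getD sK [] := by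
      unfold step1
      rw [dset_getD, if_neg (by simp only [PKey.s.injEq]; exact Ne.symm (toStr_ne_s v hv)),
        dset_getD, if_neg (by simp), dappend_getD_self _ _ _ hc]
    rw [hstep]
    simp

lemma s1_getD_i_not_mem (Lst : List Int) : ∀ (g : PyDict (List PKey)) (v : Int), v ∉ Lst →
    (Lst.foldl step1 g).1.getD (PKey.i v) [] = g.1.getD (PKey.i v) [] := by
  induction Lst with
  | nil => intro g v _; rfl
  | cons u rest ih =>
    intro g v hv
    have hvu : v ≠ u := fun h => hv (by simp [h])
    simp only [List.foldl_cons]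
    rw [ih _ v (fun h => hv (by simp [h]))]
    unfold step1
    rw [dset_getD, if_neg (by simp), dset_getD, if_neg (by simp [hvu]),
      dappend_getD_ne _ _ _ _ (by simp)]

lemma s1_getD_i (Lst : List Int) : ∀ (g : PyDict (List PKey)) (v : Int), v ∈ Lst → Lst.Nodup →
    (Lst.foldl step1 g).1.getD (PKey.i v) [] = [] := by
  induction Lst with
  | nil => intro g v h _; simp at h
  | cons u rest ih =>
    intro g v hv hnd
    simp only [List.foldl_cons]
    rcases List.mem_cons.mp hv with rfl | hvr
    · rw [s1_getD_i_not_mem rest _ v (List.nodup_cons.mp hnd).1]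
      unfold step1
      rw [dset_getD, if_neg (by simp), dset_getD, if_pos rfl]
    · exact ih _ v hvr (List.nodup_cons.mp hnd).2

lemma s1_getD_str_pres (Lst : List Int) : ∀ (g : PyDict (List PKey)) (w : Int), 1 ≤ w →
    (∀ u ∈ Lst, 1 ≤ u) →
    g.1.getD (PKey.s (PySem.Int.toStr w)) [] = [tK] →
    (Lst.foldl step1 g).1.getD (PKey.s (PySem.Int.toStr w)) [] = [tK] := by
  induction Lst with
  | nil => intro g w _ _ h; exact h
  | cons u rest ih =>
    intro g w hw hL h
    simp only [List.foldl_cons]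
    apply ih _ w hw (fun x hx => hL x (by simp [hx]))
    unfold step1
    rw [dset_getD]
    by_cases he : PKey.s (PySem.Int.toStr w) = PKey.s (PySem.Int.toStr u)
    · rw [if_pos he]
    · rw [if_neg he, dset_getD, if_neg (by simp),
        dappend_getD_ne _ _ _ _ (by simp only [ne_eq, PKey.s.injEq]; exact toStr_ne_s w hw)]
      exact h

lemma s1_getD_str (Lst : List Int) : ∀ (g : PyDict (List PKey)) (w : Int), w ∈ Lst →
    (∀ u ∈ Lst, 1 ≤ u) →
    (Lst.foldl step1 g).1.getD (PKey.s (PySem.Int.toStr w)) [] = [tK] := by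
  induction Lst with
  | nil => intro g w h _; simp at h
  | cons u rest ih =>
    intro g w hw hL
    simp only [List.foldl_cons]
    rcases List.mem_cons.mp hw with rfl | hwr
    · apply s1_getD_str_pres rest _ w (hL w (by simp)) (fun x hx => hL x (by simp [hx]))
      unfold step1
      rw [dset_getD, if_pos rfl]
    · exact ih _ w hwr (fun x hx => hL x (by simp [hx]))

lemma s1_proj (Lst : List Int) : ∀ (g : PyDict (List PKey)),
    (∀ v ∈ Lst, g.1.contains (PKey.i v) = false) → Lst.Nodup →
    (Lst.foldl step1 g).2.filterMap inlProj = Lst.reverse ++ g.2.filterMap inlProj := by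
  induction Lst with
  | nil => intro g _ _; simp
  | cons v rest ih =>
    intro g hfresh hnd
    simp only [List.foldl_cons]
    have hfresh' : ∀ u ∈ rest, (step1 g v).1.contains (PKey.i u) = false := by
      intro u hu
      have hne : u ≠ v := fun h => (List.nodup_cons.mp hnd).1 (h ▸ hu)
      unfold step1
      rw [dset_contains, dset_contains, dappend_contains, hfresh u (by simp [hu])]
      simp [hne]
    rw [ih _ hfresh' (List.nodup_cons.mp hnd).2]
    have hstep : (step1 g v).2.filterMap inlProj = v :: g.2.filterMap inlProj := by
      unfold step1
      have hiv : (dappend g sK (PKey.i v)).1.contains (PKey.i v) = false := by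
        rw [dappend_contains]
        exact hfresh v (by simp)
      have hsnd1 : (dset (dappend g sK (PKey.i v)) (PKey.i v) []).2 = PKey.i v :: g.2 := by
        rw [dset_snd, if_neg (by simp [hiv]), dappend_snd]
      rw [dset_snd, hsnd1]
      by_cases hcs : (dset (dappend g sK (PKey.i v)) (PKey.i v) []).1.contains
          (PKey.s (PySem.Int.toStr v)) = true
      · rw [if_pos hcs]
        simp [List.filterMap_cons, inlProj]
      · rw [if_neg hcs]
        simp [List.filterMap_cons, inlProj]
    rw [hstep]
    simp

-- ---- g1 facts ----
lemma hL1 (n : Int) : ∀ u ∈ L n, 1 ≤ u := by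
  intro u hu
  unfold L at hu
  exact ((PySem.List.mem_pyRange_one).mp hu).1

lemma L_nodup (n : Int) : (L n).Nodup := by
  unfold L
  exact PySem.List.nodup_pyRange_one _ _

lemma mem_L_iff (n v : Int) : v ∈ L n ↔ 1 ≤ v ∧ v ≤ n := by
  unfold L
  rw [PySem.List.mem_pyRange_one]
  omega

lemma gInit_contains_s : gInit.1.contains sK = true := by
  unfold gInit
  rw [dset_contains, dset_contains]
  simp

lemma gInit_contains_t : gInit.1.contains tK = true := by
  unfold gInit
  rw [dset_contains]
  simp

lemma gInit_contains_i (v : Int) : gInit.1.contains (PKey.i v) = false := by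
  unfold gInit
  rw [dset_contains, dset_contains]
  simp [Std.HashMap.contains_empty]

lemma gInit_getD_s : gInit.1.getD sK [] = [] := by
  unfold gInit
  rw [dset_getD, if_neg (by simp), dset_getD, if_pos rfl]

lemma gInit_snd : gInit.2 = [tK, sK] := by
  unfold gInit
  have h1 : ((∅ : Std.HashMap PKey (List PKey)), ([] : List PKey)).1.contains sK = false :=
    Std.HashMap.contains_empty
  have h0 : ((∅ : Std.HashMap PKey (List PKey)), ([] : List PKey)).1.contains tK = false :=
    Std.HashMap.contains_empty
  have h2 : (dset ((∅ : Std.HashMap PKey (List PKey)), ([] : List PKey)) sK []).1.contains tK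
      = false := by
    rw [dset_contains, h0]
    simp
  rw [dset_snd, dset_snd, h2, h1]
  simp

lemma gInit_wf : wfD gInit := by
  apply wf_dset
  apply wf_dset
  intro x
  simp [Std.HashMap.contains_empty]

lemma g1_wf (n : Int) : wfD (g1 n) := s1_wf (L n) gInit gInit_wf

lemma g1_nodup (n : Int) : (g1 n).2.Nodup := by
  apply s1_nodup (L n) gInit gInit_wf
  rw [gInit_snd]
  simp

lemma g1_proj (n : Int) : (g1 n).2.filterMap inlProj = (L n).reverse := by
  unfold g1
  rw [s1_proj (L n) gInit (fun v _ => gInit_contains_i v) (L_nodup n), gInit_snd]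
  simp [inlProj]

lemma g1_contains_s (n : Int) : (g1 n).1.contains sK = true :=
  s1_contains_mono (L n) gInit sK gInit_contains_s

lemma g1_contains_t (n : Int) : (g1 n).1.contains tK = true :=
  s1_contains_mono (L n) gInit tK gInit_contains_t

lemma g1_contains_i (n : Int) (v : Int) (hv : v ∈ L n) :
    (g1 n).1.contains (PKey.i v) = true := s1_contains_i (L n) gInit v hv

lemma g1_contains_str (n : Int) (w : Int) (hw : w ∈ L n) :
    (g1 n).1.contains (PKey.s (PySem.Int.toStr w)) = true := s1_contains_str (L n) gInit w hw

-- ---- g2 facts ----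
lemma pairs_fst (edges : List (Int × Int)) : ∀ p ∈ pairsOf edges, ∃ u,
    (∃ e ∈ edges, u = e.1 ∨ u = e.2) ∧ p.1 = PKey.i u := by
  intro p hp
  rcases List.mem_flatMap.mp hp with ⟨e, he, hpe⟩
  rcases (by simpa using hpe : p = (PKey.i e.1, PKey.s (PySem.Int.toStr e.2)) ∨
      p = (PKey.i e.2, PKey.s (PySem.Int.toStr e.1))) with rfl | rfl
  · exact ⟨e.1, ⟨e, he, Or.inl rfl⟩, rfl⟩
  · exact ⟨e.2, ⟨e, he, Or.inr rfl⟩, rfl⟩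

lemma g2_snd (n : Int) (edges : List (Int × Int)) : (g2 n edges).2 = (g1 n).2 :=
  s2_snd (pairsOf edges) (g1 n)

lemma g2_getD_str (n : Int) (edges : List (Int × Int)) (str : String) :
    (g2 n edges).1.getD (PKey.s str) [] = (g1 n).1.getD (PKey.s str) [] := by
  unfold g2
  exact s2_getD_str (pairsOf edges)
    (fun p hp => (pairs_fst edges p hp).elim (fun u hu => ⟨u, hu.2⟩)) (g1 n) str

lemma g2_getD_int (n : Int) (edges : List (Int × Int)) (v : Int)
    (hpre : Pre_assign_targets n 0 edges) :
    (g2 n edges).1.getD (PKey.i v) [] = (adjOf edges v).reverse ++ (g1 n).1.getD (PKey.i v) [] := by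
  unfold g2 adjOf
  rw [s2_getD_int (pairsOf edges) (g1 n) v]
  intro p hp
  rcases pairs_fst edges p hp with ⟨u, ⟨e, he, hue⟩, hp1⟩
  rw [hp1]
  apply g1_contains_i
  rw [mem_L_iff]
  rcases hue with rfl | rfl
  · exact ⟨(hpre e he).1.1, (hpre e he).1.2⟩
  · exact ⟨(hpre e he).2.1, (hpre e he).2.2⟩

-- ---- vis0 ----
lemma allFalse_foldl (ks : List PKey) : ∀ (d : PyDict Bool),
    (∀ x, d.1.getD x false = false) →
    ∀ x, (ks.foldl (fun d node => dset d node false) d).1.getD x false = false := by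
  induction ks with
  | nil => intro d h x; exact h x
  | cons k ks ih =>
    intro d h x
    simp only [List.foldl_cons]
    apply ih
    intro y
    rw [dset_getD]
    split_ifs
    · rfl
    · exact h y

lemma vis0_getD (n : Int) (edges : List (Int × Int)) (x : PKey) :
    (vis0 n edges).1.getD x false = false := by
  unfold vis0
  exact allFalse_foldl _ _ (fun y => by simp [Std.HashMap.getD_empty]) x

lemma foldl_dset_wf (ks : List PKey) : ∀ (d : PyDict Bool), wfD d →
    wfD (ks.foldl (fun d node => dset d node false) d) := by
  induction ks with
  | nil => intro d h; exact h
  | cons k ks ih =>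
    intro d h
    simp only [List.foldl_cons]
    exact ih _ (wf_dset _ _ _ h)

lemma foldl_dset_snd (ks : List PKey) : ∀ (d : PyDict Bool), wfD d →
    (∀ k ∈ ks, k ∉ d.2) → ks.Nodup →
    (ks.foldl (fun d node => dset d node false) d).2 = ks.reverse ++ d.2 := by
  induction ks with
  | nil => intro d _ _ _; simp
  | cons k ks ih =>
    intro d hw hfr hnd
    simp only [List.foldl_cons]
    have hc : d.1.contains k = false :=
      bfalse (fun hcc => hfr k (by simp) ((hw k).mp hcc))
    have hsnd : (dset d k false).2 = k :: d.2 := by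
      rw [dset_snd, if_neg (by simp [hc])]
    rw [ih _ (wf_dset _ _ _ hw) ?fr (List.nodup_cons.mp hnd).2, hsnd]
    · simp
    case fr =>
      intro k' hk'
      rw [hsnd]
      intro hmem
      rcases List.mem_cons.mp hmem with rfl | hmem2
      · exact (List.nodup_cons.mp hnd).1 hk'
      · exact hfr k' (by simp [hk']) hmem2

lemma vis0_wf (n : Int) (edges : List (Int × Int)) : wfD (vis0 n edges) := by
  unfold vis0
  apply foldl_dset_wf
  intro x
  simp [Std.HashMap.contains_empty]

lemma vis0_snd (n : Int) (edges : List (Int × Int)) : (vis0 n edges).2 = (g2 n edges).2 := by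
  unfold vis0
  rw [foldl_dset_snd _ _ (by intro x; simp [Std.HashMap.contains_empty]) (by simp)
    (by rw [g2_snd]; exact List.nodup_reverse.mpr (g1_nodup n))]
  simp

-- ---- markTrue ----
lemma mark_getD (ks : List PKey) : ∀ (d : PyDict Bool) (x : PKey),
    (markTrue d ks).1.getD x false = (decide (x ∈ ks) || d.1.getD x false) := by
  induction ks with
  | nil => intro d x; simp [markTrue]
  | cons k ks ih =>
    intro d x
    simp only [markTrue, List.foldl_cons]
    rw [show (ks.foldl (fun d k => dset d k true) (dset d k true)) = markTrue (dset d k true) ks from rfl]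
    rw [ih, dset_getD]
    by_cases h : x = k
    · simp [h]
    · simp [h]

lemma mark_insert (d : PyDict Bool) (ks : List PKey) (k : PKey) :
    dset (markTrue d ks) k true = markTrue d (ks ++ [k]) := by
  simp [markTrue, List.foldl_append]

lemma mark_snd (ks : List PKey) : ∀ (d : PyDict Bool), wfD d →
    (∀ k ∈ ks, k ∈ d.2) → (markTrue d ks).2 = d.2 := by
  induction ks with
  | nil => intro d _ _; rfl
  | cons k ks ih =>
    intro d hw h
    simp only [markTrue, List.foldl_cons]
    rw [show (ks.foldl (fun d k => dset d k true) (dset d k true)) = markTrue (dset d k true) ks from rfl]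
    have hsnd : (dset d k true).2 = d.2 := by
      rw [dset_snd, if_pos ((hw k).mpr (h k (by simp)))]
    rw [ih _ (wf_dset _ _ _ hw) (by rw [hsnd]; exact fun k' hk' => h k' (by simp [hk'])), hsnd]

-- ---- find_path trace lemmas ----
lemma fl_nil (G : Std.HashMap PKey (List PKey)) (fuel : Nat) (vis : PyDict Bool) :
    find_loop G fuel [] vis = (false, vis) := by
  simp [find_loop]

lemma fp_succ (G : Std.HashMap PKey (List PKey)) (fuel : Nat) (cur : PKey) (vis : PyDict Bool)
    (h : cur ≠ tK) (h1 : 1 ≤ fuel) :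
    find_path G fuel cur vis = find_loop G (fuel - 1) ((G.getD cur []).reverse) (dset vis cur true) := by
  cases fuel with
  | zero => omega
  | succ f => simp [find_path, h]

lemma fp_t (G : Std.HashMap PKey (List PKey)) (fuel : Nat) (vis : PyDict Bool) (h : 1 ≤ fuel) :
    find_path G fuel tK vis = (true, dset vis tK true) := by
  cases fuel with
  | zero => omega
  | succ f => simp [find_path]

lemma fp_str (G : Std.HashMap PKey (List PKey)) (fuel : Nat) (w : String) (vis : PyDict Bool)
    (hfuel : 2 ≤ fuel)
    (hG : G.getD (PKey.s w) [] = [tK]) (hw : w ≠ "t")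
    (hvis : vis.1.getD tK false = false) :
    find_path G fuel (PKey.s w) vis = (true, dset (dset vis (PKey.s w) true) tK true) := by
  rw [fp_succ G fuel _ _ (by simp [hw]) (by omega), hG]
  simp only [List.reverse_singleton, find_loop]
  have hv : ((dset vis (PKey.s w) true).1.getD tK false) = false := by
    rw [dset_getD, if_neg (by simp [Ne.symm hw])]
    exact hvis
  rw [hv]
  simp only [Bool.not_false, if_true]
  rw [fp_t G (fuel - 1) _ (by omega)]
  rfl

lemma fp_int_empty (G : Std.HashMap PKey (List PKey)) (fuel : Nat) (v : Int) (vis : PyDict Bool)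
    (hfuel : 1 ≤ fuel) (hG : G.getD (PKey.i v) [] = []) :
    find_path G fuel (PKey.i v) vis = (false, dset vis (PKey.i v) true) := by
  rw [fp_succ G fuel _ _ (by simp) hfuel, hG]
  rw [List.reverse_nil, fl_nil]

lemma fp_int_edge (G : Std.HashMap PKey (List PKey)) (fuel : Nat) (v w : Int) (rest : List PKey)
    (vis : PyDict Bool) (hfuel : 3 ≤ fuel)
    (hG : (G.getD (PKey.i v) []).reverse = PKey.s (PySem.Int.toStr w) :: rest)
    (hGw : G.getD (PKey.s (PySem.Int.toStr w)) [] = [tK])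
    (hwt : PySem.Int.toStr w ≠ "t")
    (hvw : vis.1.getD (PKey.s (PySem.Int.toStr w)) false = false)
    (hvt : vis.1.getD tK false = false) :
    find_path G fuel (PKey.i v) vis =
      (true, dset (dset (dset vis (PKey.i v) true) (PKey.s (PySem.Int.toStr w)) true) tK true) := by
  rw [fp_succ G fuel _ _ (by simp) (by omega), hG]
  simp only [find_loop]
  have hv1 : ((dset vis (PKey.i v) true).1.getD (PKey.s (PySem.Int.toStr w)) false) = false := by
    rw [dset_getD, if_neg (by simp)]
    exact hvw
  rw [hv1]
  simp only [Bool.not_false, if_true]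
  rw [fp_str G (fuel - 1) (PySem.Int.toStr w) _ (by omega) hGw hwt ?hvt]
  · rfl
  case hvt =>
    rw [dset_getD, if_neg (by simp)]
    exact hvt

-- ---- main loop lemmas (port A) ----
lemma T_loop_none (n : Int) (edges : List (Int × Int)) (hpre : Pre_assign_targets n 0 edges)
    (fuel : Nat) (hfuel : 3 ≤ fuel) (R : List Int) : ∀ (P : List Int), L n = P ++ R →
    (∀ v ∈ R, epred edges v = false) →
    find_loop (g2 n edges).1 fuel (R.map PKey.i) (markTrue (vis0 n edges) (sK :: P.map PKey.i)) =
      (false, markTrue (vis0 n edges) (sK :: (P ++ R).map PKey.i)) := by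
  induction R with
  | nil =>
    intro P hsplit _
    simp only [List.map_nil]
    rw [fl_nil]
    simp
  | cons v R' ih =>
    intro P hsplit hR
    have hvL : v ∈ L n := by rw [hsplit]; simp
    have hnd : (P ++ v :: R').Nodup := hsplit ▸ L_nodup n
    have hvP : v ∉ P := by
      rcases List.nodup_append.mp hnd with ⟨_, _, hdisj⟩
      intro hvp
      exact hdisj v hvp v (by simp) rfl
    simp only [List.map_cons]
    simp only [find_loop]
    have hget : (markTrue (vis0 n edges) (sK :: P.map PKey.i)).1.getD (PKey.i v) false = false := by
      rw [mark_getD, vis0_getD]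
      simp [hvP]
    rw [hget]
    have hadj : (g2 n edges).1.getD (PKey.i v) [] = [] := by
      rw [g2_getD_int n edges v hpre]
      rw [show g1 n = (L n).foldl step1 gInit from rfl,
        s1_getD_i (L n) gInit v hvL (L_nodup n),
        (adj_nil_iff edges v).mpr (hR v (by simp))]
      rfl
    rw [fp_int_empty _ _ _ _ (by omega) hadj]
    dsimp only
    rw [mark_insert,
      show (sK :: List.map PKey.i P) ++ [PKey.i v] = sK :: List.map PKey.i (P ++ [v]) from by simp]
    rw [ih (P ++ [v]) (by rw [hsplit]; simp) (fun u hu => hR u (by simp [hu]))]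
    simp

lemma T_loop_some (n : Int) (edges : List (Int × Int)) (hpre : Pre_assign_targets n 0 edges)
    (fuel : Nat) (hfuel : 3 ≤ fuel) (k : Int) (R2 : List Int) (w : Int) (rest : List PKey)
    (hadj : adjOf edges k = PKey.s (PySem.Int.toStr w) :: rest)
    (hw : 1 ≤ w) (hwn : w ≤ n)
    (R1 : List Int) : ∀ (P : List Int),
    L n = P ++ R1 ++ k :: R2 →
    (∀ v ∈ R1, epred edges v = false) →
    find_loop (g2 n edges).1 fuel ((R1 ++ k :: R2).map PKey.i) (markTrue (vis0 n edges) (sK :: P.map PKey.i)) =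
      (true, markTrue (vis0 n edges) ((sK :: (P ++ R1).map PKey.i) ++ [PKey.i k, PKey.s (PySem.Int.toStr w), tK])) := by
  induction R1 with
  | nil =>
    intro P hsplit _
    simp only [List.nil_append, List.map_cons]
    have hkL : k ∈ L n := by rw [hsplit]; simp
    have hnd : (P ++ k :: R2).Nodup := by
      have := hsplit ▸ L_nodup n
      simpa using this
    have hkP : k ∉ P := by
      rcases List.nodup_append.mp hnd with ⟨_, _, hdisj⟩
      intro hkp
      exact hdisj k hkp k (by simp) rfl
    simp only [find_loop]
    have hget : (markTrue (vis0 n edges) (sK :: P.map PKey.i)).1.getD (PKey.i k) false = false := by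
      rw [mark_getD, vis0_getD]
      simp [hkP]
    rw [hget]
    have hGk : ((g2 n edges).1.getD (PKey.i k) []).reverse = PKey.s (PySem.Int.toStr w) :: rest := by
      rw [g2_getD_int n edges k hpre]
      rw [show g1 n = (L n).foldl step1 gInit from rfl,
        s1_getD_i (L n) gInit k hkL (L_nodup n), hadj]
      simp
    have hGw : (g2 n edges).1.getD (PKey.s (PySem.Int.toStr w)) [] = [tK] := by
      rw [g2_getD_str]
      rw [show g1 n = (L n).foldl step1 gInit from rfl]
      exact s1_getD_str (L n) gInit w ((mem_L_iff n w).mpr ⟨hw, hwn⟩) (hL1 n)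
    have hvw : (markTrue (vis0 n edges) (sK :: P.map PKey.i)).1.getD (PKey.s (PySem.Int.toStr w)) false = false := by
      rw [mark_getD, vis0_getD]
      simp
      exact toStr_ne_s w hw
    have hvt : (markTrue (vis0 n edges) (sK :: P.map PKey.i)).1.getD tK false = false := by
      rw [mark_getD, vis0_getD]
      simp
    rw [fp_int_edge _ _ _ _ _ _ (by omega) hGk hGw (toStr_ne_t w hw) hvw hvt]
    dsimp only
    rw [mark_insert, mark_insert, mark_insert]
    simp [List.append_assoc]
  | cons v R1' ih =>
    intro P hsplit hR1
    have hvL : v ∈ L n := by rw [hsplit]; simp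
    have hnd : (P ++ (v :: R1') ++ k :: R2).Nodup := hsplit ▸ L_nodup n
    have hvP : v ∉ P := by
      have hnd2 : (P ++ (v :: R1' ++ k :: R2)).Nodup := by simpa using hnd
      rcases List.nodup_append.mp hnd2 with ⟨_, _, hdisj⟩
      intro hvp
      exact hdisj v hvp v (by simp) rfl
    simp only [List.cons_append, List.map_cons]
    simp only [find_loop]
    have hget : (markTrue (vis0 n edges) (sK :: P.map PKey.i)).1.getD (PKey.i v) false = false := by
      rw [mark_getD, vis0_getD]
      simp [hvP]
    rw [hget]
    have hadjv : (g2 n edges).1.getD (PKey.i v) [] = [] := by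
      rw [g2_getD_int n edges v hpre]
      rw [show g1 n = (L n).foldl step1 gInit from rfl,
        s1_getD_i (L n) gInit v hvL (L_nodup n),
        (adj_nil_iff edges v).mpr (hR1 v (by simp))]
      rfl
    rw [fp_int_empty _ _ _ _ (by omega) hadjv]
    dsimp only
    rw [mark_insert,
      show (sK :: List.map PKey.i P) ++ [PKey.i v] = sK :: List.map PKey.i (P ++ [v]) from by simp]
    rw [ih (P ++ [v]) (by rw [hsplit]; simp) (fun u hu => hR1 u (by simp [hu]))]
    simp [List.append_assoc]

-- ---- port A connection ----
lemma stage2_eq (edges : List (Int × Int)) : ∀ (g : PyDict (List PKey)),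
    edges.foldl (fun g e =>
      dappend (dappend g (PKey.i e.1) (PKey.s (PySem.Int.toStr e.2)))
        (PKey.i e.2) (PKey.s (PySem.Int.toStr e.1))) g =
    (pairsOf edges).foldl (fun d p => dappend d p.1 p.2) g := by
  induction edges with
  | nil => intro g; rfl
  | cons e es ih =>
    intro g
    simp only [List.foldl_cons]
    rw [ih]
    simp only [pairsOf, List.flatMap_cons, List.foldl_append, List.foldl_cons, List.foldl_nil]

lemma portA_eq (n : Int) (m : Int) (edges : List (Int × Int)) :
    assign_targets n m edges =
      match find_path (g2 n edges).1 ((g2 n edges).2.length + 1) sK (vis0 n edges) with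
      | (true, visited') =>
        let targets : List Int := (visited'.2.reverse).filterMap (fun node =>
          if visited'.1.getD node false then
            match node with
            | PKey.i v => some v
            | PKey.s _ => none
          else none)
        if (targets.length : Int) = n then
          String.intercalate "\n" (targets.map PySem.Int.toStr)
        else "Impossible"
      | (false, _) => "Impossible" := by
  unfold assign_targets
  dsimp only
  rw [stage2_eq]
  rfl

-- ---- length lower bound ----
lemma two_mem_le_length {α : Type} (l : List α) (a b : α) (ha : a ∈ l) (hb : b ∈ l)
    (hab : a ≠ b) : 2 ≤ l.length := by
  cases l with
  | nil => simp at ha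
  | cons c cs =>
    cases cs with
    | nil =>
      simp at ha hb
      exact absurd (ha.trans hb.symm) hab
    | cons d ds => simp

lemma len_split (l : List PKey) :
    l.length = (l.filterMap inlProj).length + (l.filter isSKey).length := by
  induction l with
  | nil => simp
  | cons a l ih =>
    cases a with
    | i v => simp [List.filterMap_cons, List.filter_cons, inlProj, isSKey, ih]; omega
    | s str => simp [List.filterMap_cons, List.filter_cons, inlProj, isSKey, ih]; omega

lemma size_lb (n : Int) (edges : List (Int × Int)) :
    2 + (L n).length ≤ (g2 n edges).2.length := by
  rw [g2_snd]
  have hs : sK ∈ (g1 n).2.filter isSKey :=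
    List.mem_filter.mpr ⟨((g1_wf n) sK).mp (g1_contains_s n), rfl⟩
  have ht : tK ∈ (g1 n).2.filter isSKey :=
    List.mem_filter.mpr ⟨((g1_wf n) tK).mp (g1_contains_t n), rfl⟩
  have h2 : 2 ≤ ((g1 n).2.filter isSKey).length :=
    two_mem_le_length _ sK tK hs ht (by simp)
  have h3 : ((g1 n).2.filterMap inlProj).length = (L n).length := by
    rw [g1_proj]
    simp
  have h4 := len_split (g1 n).2
  omega

lemma filterMap_if_proj (c : PKey → Bool) : ∀ (l : List PKey),
    l.filterMap (fun node => if c node then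
        (match node with | PKey.i v => some v | PKey.s _ => none) else none) =
      (l.filterMap inlProj).filter (fun v => c (PKey.i v)) := by
  intro l
  induction l with
  | nil => simp
  | cons a l ih =>
    cases a with
    | i v =>
      by_cases h : c (PKey.i v) = true
      · simp [List.filterMap_cons, h, List.filter_cons, inlProj, ih]
      · simp [List.filterMap_cons, h, List.filter_cons, inlProj, ih]
    | s str =>
      by_cases h : c (PKey.s str) = true <;> simp [List.filterMap_cons, h, inlProj, ih]

lemma find?_split (p : Int → Bool) : ∀ (l : List Int) (k : Int), l.find? p = some k →
    p k = true ∧ ∃ as bs, l = as ++ k :: bs ∧ ∀ a ∈ as, p a = false := by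
  intro l
  induction l with
  | nil => intro k h; simp at h
  | cons x xs ih =>
    intro k h
    by_cases hx : p x = true
    · rw [List.find?_cons_of_pos hx] at h
      have hk : x = k := by simpa using h
      subst hk
      exact ⟨hx, [], xs, rfl, by simp⟩
    · rw [List.find?_cons_of_neg (by simpa using hx)] at h
      obtain ⟨hk, as, bs, hsplit, hall⟩ := ih k h
      refine ⟨hk, x :: as, bs, by simp [hsplit], ?_⟩
      intro a ha
      rcases List.mem_cons.mp ha with rfl | ha1
      · exact bfalse hx
      · exact hall a ha1

-- counting a split of L n: the prefix up to k has exactly k elements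
lemma klen (n k : Int) (R1 R2 : List Int) (hsplit : L n = R1 ++ k :: R2)
    (hk1 : 1 ≤ k) (hkn : k ≤ n) :
    ((R1 ++ [k]).length : Int) = k ∧ (k = n → R2 = []) := by
  have hLlen : (L n).length = n.toNat := by
    unfold L
    rw [PySem.List.length_pyRange_one]
    congr 1
    omega
  have hlen5 : (L n).length = R1.length + 1 + R2.length := by
    rw [hsplit]
    simp
    omega
  have hklen : (k : Int) = 1 + (R1.length : Int) := by
    have hnpos : 1 ≤ n := by omega
    have hR1n : (R1.length : Int) < n := by
      have : R1.length + 1 ≤ n.toNat := by omega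
      omega
    have hsplit2 : L n = PySem.List.pyRange 1 (1 + (R1.length : Int)) 1 ++
        PySem.List.pyRange (1 + (R1.length : Int)) (n + 1) 1 := by
      unfold L
      exact PySem.List.pyRange_one_append 1 (1 + (R1.length : Int)) (n + 1)
        (by omega) (by omega)
    have hlen3 : (PySem.List.pyRange 1 (1 + (R1.length : Int)) 1).length = R1.length := by
      rw [PySem.List.length_pyRange_one]
      omega
    have heq : R1 ++ k :: R2 = PySem.List.pyRange 1 (1 + (R1.length : Int)) 1 ++
        PySem.List.pyRange (1 + (R1.length : Int)) (n + 1) 1 := hsplit.symm.trans hsplit2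
    have h6 := (List.append_inj heq (by rw [hlen3])).2
    rw [PySem.List.pyRange_one_cons (by omega)] at h6
    exact (List.cons.injEq _ _ _ _).mp h6 |>.1
  constructor
  · simp
    omega
  · intro hkeqn
    apply List.eq_nil_of_length_eq_zero
    omega

-- ---- A = C ----
lemma A_eq_C (n : Int) (m : Int) (edges : List (Int × Int))
    (hpre : Pre_assign_targets n 0 edges) : assign_targets n m edges = C n edges := by
  rw [portA_eq]
  by_cases hnil : L n = []
  · rw [fp_succ _ _ _ _ (by simp) (by omega)]
    have hs : (g2 n edges).1.getD sK [] = [] := by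
      rw [g2_getD_str, show g1 n = (L n).foldl step1 gInit from rfl, hnil]
      exact gInit_getD_s
    rw [hs]
    rw [List.reverse_nil, fl_nil,
      show C n edges = "Impossible" from by unfold C; rw [hnil]; rfl]
  · have hlenpos : 0 < (L n).length := List.length_pos_of_ne_nil hnil
    have hsz := size_lb n edges
    rw [fp_succ _ _ _ _ (by simp) (by omega)]
    simp only [Nat.add_sub_cancel]
    have hS : ((g2 n edges).1.getD sK []).reverse = (L n).map PKey.i := by
      rw [g2_getD_str, show g1 n = (L n).foldl step1 gInit from rfl,
        s1_getD_s (L n) gInit (hL1 n) gInit_contains_s, gInit_getD_s]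
      simp
    rw [hS]
    rw [show dset (vis0 n edges) sK true =
      markTrue (vis0 n edges) (sK :: List.map PKey.i []) from by simp [markTrue]]
    cases hf : (L n).find? (fun v => epred edges v) with
    | none =>
      have hall : ∀ v ∈ L n, epred edges v = false := by
        intro v hv
        exact bfalse (List.find?_eq_none.mp hf v hv)
      rw [T_loop_none n edges hpre _ (by omega) (L n) [] (by simp) hall]
      unfold C
      rw [hf]
    | some k =>
      obtain ⟨hk, R1, R2, hsplit, hR1⟩ := find?_split _ (L n) k hf
      have hkL : k ∈ L n := by rw [hsplit]; simp
      have hkb := (mem_L_iff n k).mp hkL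
      cases hadj : adjOf edges k with
      | nil => rw [(adj_nil_iff edges k).mp hadj] at hk; simp at hk
      | cons x rest =>
      obtain ⟨w, ⟨e, he, hwe⟩, rfl⟩ := adj_mem edges k x (by rw [hadj]; simp)
      have hwb : 1 ≤ w ∧ w ≤ n := by
        rcases hwe with rfl | rfl
        · exact ⟨(hpre e he).1.1, (hpre e he).1.2⟩
        · exact ⟨(hpre e he).2.1, (hpre e he).2.2⟩
      conv_lhs => rw [hsplit]
      rw [T_loop_some n edges hpre _ (by omega) k R2 w rest hadj hwb.1 hwb.2 R1 []
        (by simpa using hsplit) hR1]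
      dsimp only
      set M := (sK :: (([] : List Int) ++ R1).map PKey.i) ++
        [PKey.i k, PKey.s (PySem.Int.toStr w), tK] with hM
      have hwL : w ∈ L n := (mem_L_iff n w).mpr hwb
      have hkeysM : ∀ x ∈ M, x ∈ (vis0 n edges).2 := by
        rw [vis0_snd, g2_snd]
        intro x hx
        rw [hM] at hx
        rcases List.mem_append.mp hx with h1 | h1
        · rcases List.mem_cons.mp h1 with rfl | h2
          · exact ((g1_wf n) sK).mp (g1_contains_s n)
          · rcases List.mem_map.mp (by simpa using h2) with ⟨v, hv, rfl⟩
            exact ((g1_wf n) _).mp (g1_contains_i n v (by rw [hsplit]; simp [hv]))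
        · rcases List.mem_cons.mp h1 with rfl | h2
          · exact ((g1_wf n) _).mp (g1_contains_i n k hkL)
          · rcases List.mem_cons.mp h2 with rfl | h3
            · exact ((g1_wf n) _).mp (g1_contains_str n w hwL)
            · rcases List.mem_cons.mp h3 with rfl | h4
              · exact ((g1_wf n) tK).mp (g1_contains_t n)
              · simp at h4
      have hkeys : (markTrue (vis0 n edges) M).2 = (vis0 n edges).2 :=
        mark_snd M _ (vis0_wf n edges) hkeysM
      rw [hkeys, vis0_snd, g2_snd]
      have hgd : ∀ node, (markTrue (vis0 n edges) M).1.getD node false = decide (node ∈ M) := by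
        intro node
        rw [mark_getD, vis0_getD]
        simp
      simp only [hgd]
      rw [filterMap_if_proj (fun node => decide (node ∈ M)) ((g1 n).2.reverse)]
      rw [List.filterMap_reverse, g1_proj, List.reverse_reverse]
      have hcont : ∀ v : Int, decide (PKey.i v ∈ M) = decide (v ∈ R1 ∨ v = k) := by
        intro v
        apply decide_eq_decide.mpr
        rw [hM]
        simp
      have hfe : (L n).filter (fun v => decide (PKey.i v ∈ M)) = R1 ++ [k] := by
        rw [List.filter_congr (fun v _ => hcont v), hsplit]
        have hndL : (R1 ++ k :: R2).Nodup := hsplit ▸ L_nodup n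
        rcases List.nodup_append.mp hndL with ⟨hnd1, hnd2, hdisj⟩
        rw [List.filter_append]
        have h1 : R1.filter (fun v => decide (v ∈ R1 ∨ v = k)) = R1 := by
          rw [List.filter_eq_self]
          intro a ha
          simp [ha]
        have h2 : (k :: R2).filter (fun v => decide (v ∈ R1 ∨ v = k)) = [k] := by
          simp only [List.filter_cons]
          rw [if_pos (by simp)]
          congr 1
          rw [List.filter_eq_nil_iff]
          intro a ha
          simp only [decide_eq_true_eq]
          push_neg
          constructor
          · intro haR1
            exact hdisj a haR1 a (by simp [ha]) rfl
          · intro hak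
            exact (List.nodup_cons.mp hnd2).1 (hak ▸ ha)
        rw [h1, h2]
      rw [hfe]
      obtain ⟨hlen, hR2nil⟩ := klen n k R1 R2 hsplit hkb.1 hkb.2
      rw [hlen]
      unfold C
      rw [hf]
      dsimp only
      by_cases hkn : k = n
      · rw [if_pos hkn, if_pos hkn]
        rw [hsplit, hR2nil hkn]
      · rw [if_neg hkn, if_neg hkn]

-- ================= B-side lemmas =================

-- B's stage-1 step: graph[v] = []; graph[str(v)] = ['t']
def bstep (g : PyDict (List PKey)) (v : Int) : PyDict (List PKey) :=
  dset (dset g (PKey.i v) []) (PKey.s (PySem.Int.toStr v)) [tK]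

def gInitB (n : Int) : PyDict (List PKey) :=
  dset (dset ((∅ : Std.HashMap PKey (List PKey)), ([] : List PKey))
    sK (((L n).map PKey.i).reverse)) tK []

def g1b (n : Int) : PyDict (List PKey) := (L n).foldl bstep (gInitB n)

def g2b (n : Int) (edges : List (Int × Int)) : PyDict (List PKey) :=
  (pairsOf edges).foldl (fun d p => dappend d p.1 p.2) (g1b n)

-- the visited set after the vertices of P have been discovered
def VL (P : List Int) : PySem.Set PKey := sK :: P.map PKey.i

lemma cts_false (s : PySem.Set PKey) (x : PKey) (h : ¬ x ∈ s) :
    PySem.Set.contains s x = false := by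
  cases hc : PySem.Set.contains s x
  · rfl
  · exact absurd ((PySem.Set.contains_iff _ _).mp hc) h

lemma padd (s : PySem.Set PKey) (x : PKey) (h : ¬ x ∈ s) :
    PySem.Set.add s x = s ++ [x] := by
  unfold PySem.Set.add
  rw [cts_false s x h]
  simp

lemma i_not_mem_VL (P : List Int) (v : Int) (h : v ∉ P) : PKey.i v ∉ VL P := by
  unfold VL
  simp only [List.mem_cons, List.mem_map]
  push_neg
  exact ⟨by simp, fun a ha hav => h ((PKey.i.injEq _ _).mp hav ▸ ha)⟩

lemma VL_add (P : List Int) (v : Int) (h : v ∉ P) :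
    PySem.Set.add (VL P) (PKey.i v) = VL (P ++ [v]) := by
  rw [padd _ _ (i_not_mem_VL P v h)]
  unfold VL
  simp

-- stage-1 B facts
lemma bstep_contains_mono (g : PyDict (List PKey)) (v : Int) (x : PKey)
    (h : g.1.contains x = true) : (bstep g v).1.contains x = true := by
  unfold bstep
  rw [dset_contains, dset_contains, h]
  simp

lemma b1_contains_mono (Lst : List Int) : ∀ (g : PyDict (List PKey)) (x : PKey),
    g.1.contains x = true → (Lst.foldl bstep g).1.contains x = true := by
  induction Lst with
  | nil => intro g x h; exact h
  | cons v rest ih =>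
    intro g x h
    simp only [List.foldl_cons]
    exact ih _ x (bstep_contains_mono g v x h)

lemma b1_contains_i (Lst : List Int) : ∀ (g : PyDict (List PKey)) (v : Int), v ∈ Lst →
    (Lst.foldl bstep g).1.contains (PKey.i v) = true := by
  induction Lst with
  | nil => intro g v h; simp at h
  | cons u rest ih =>
    intro g v hv
    simp only [List.foldl_cons]
    rcases List.mem_cons.mp hv with rfl | hvr
    · apply b1_contains_mono
      unfold bstep
      rw [dset_contains, dset_contains]
      simp
    · exact ih _ v hvr

lemma b1_getD_s (Lst : List Int) : ∀ (g : PyDict (List PKey)), (∀ u ∈ Lst, 1 ≤ u) →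
    (Lst.foldl bstep g).1.getD sK [] = g.1.getD sK [] := by
  induction Lst with
  | nil => intro g _; rfl
  | cons v rest ih =>
    intro g hL
    have hv : 1 ≤ v := hL v (by simp)
    simp only [List.foldl_cons]
    rw [ih _ (fun u hu => hL u (by simp [hu]))]
    unfold bstep
    rw [dset_getD, if_neg (by simp only [PKey.s.injEq]; exact Ne.symm (toStr_ne_s v hv)),
      dset_getD, if_neg (by simp)]

lemma b1_getD_i_not_mem (Lst : List Int) : ∀ (g : PyDict (List PKey)) (v : Int), v ∉ Lst →
    (Lst.foldl bstep g).1.getD (PKey.i v) [] = g.1.getD (PKey.i v) [] := by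
  induction Lst with
  | nil => intro g v _; rfl
  | cons u rest ih =>
    intro g v hv
    have hvu : v ≠ u := fun h => hv (by simp [h])
    simp only [List.foldl_cons]
    rw [ih _ v (fun h => hv (by simp [h]))]
    unfold bstep
    rw [dset_getD, if_neg (by simp), dset_getD, if_neg (by simp [hvu])]

lemma b1_getD_i (Lst : List Int) : ∀ (g : PyDict (List PKey)) (v : Int), v ∈ Lst → Lst.Nodup →
    (Lst.foldl bstep g).1.getD (PKey.i v) [] = [] := by
  induction Lst with
  | nil => intro g v h _; simp at h
  | cons u rest ih =>
    intro g v hv hnd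
    simp only [List.foldl_cons]
    rcases List.mem_cons.mp hv with rfl | hvr
    · rw [b1_getD_i_not_mem rest _ v (List.nodup_cons.mp hnd).1]
      unfold bstep
      rw [dset_getD, if_neg (by simp), dset_getD, if_pos rfl]
    · exact ih _ v hvr (List.nodup_cons.mp hnd).2

lemma b1_getD_str_pres (Lst : List Int) : ∀ (g : PyDict (List PKey)) (w : Int), 1 ≤ w →
    g.1.getD (PKey.s (PySem.Int.toStr w)) [] = [tK] →
    (Lst.foldl bstep g).1.getD (PKey.s (PySem.Int.toStr w)) [] = [tK] := by
  induction Lst with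
  | nil => intro g w _ h; exact h
  | cons u rest ih =>
    intro g w hw h
    simp only [List.foldl_cons]
    apply ih _ w hw
    unfold bstep
    rw [dset_getD]
    by_cases he : PKey.s (PySem.Int.toStr w) = PKey.s (PySem.Int.toStr u)
    · rw [if_pos he]
    · rw [if_neg he, dset_getD, if_neg (by simp)]
      exact h

lemma b1_getD_str (Lst : List Int) : ∀ (g : PyDict (List PKey)) (w : Int), w ∈ Lst →
    (∀ u ∈ Lst, 1 ≤ u) →
    (Lst.foldl bstep g).1.getD (PKey.s (PySem.Int.toStr w)) [] = [tK] := by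
  induction Lst with
  | nil => intro g w h _; simp at h
  | cons u rest ih =>
    intro g w hw hL
    simp only [List.foldl_cons]
    rcases List.mem_cons.mp hw with rfl | hwr
    · apply b1_getD_str_pres rest _ w (hL w (by simp))
      unfold bstep
      rw [dset_getD, if_pos rfl]
    · exact ih _ w hwr (fun x hx => hL x (by simp [hx]))

-- g2b getD facts
lemma g2b_getD_s (n : Int) (edges : List (Int × Int)) :
    (g2b n edges).1.getD sK [] = ((L n).map PKey.i).reverse := by
  unfold g2b
  rw [s2_getD_str (pairsOf edges)
    (fun p hp => (pairs_fst edges p hp).elim (fun u hu => ⟨u, hu.2⟩)) (g1b n) "s"]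
  show (g1b n).1.getD sK [] = _
  unfold g1b
  rw [b1_getD_s (L n) _ (hL1 n)]
  unfold gInitB
  rw [dset_getD, if_neg (by simp), dset_getD, if_pos rfl]

lemma g2b_getD_str (n : Int) (edges : List (Int × Int)) (w : Int) (hw : w ∈ L n) :
    (g2b n edges).1.getD (PKey.s (PySem.Int.toStr w)) [] = [tK] := by
  unfold g2b
  rw [s2_getD_str (pairsOf edges)
    (fun p hp => (pairs_fst edges p hp).elim (fun u hu => ⟨u, hu.2⟩)) (g1b n) _]
  unfold g1b
  exact b1_getD_str (L n) _ w hw (hL1 n)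

lemma g2b_getD_int (n : Int) (edges : List (Int × Int)) (v : Int) (hv : v ∈ L n)
    (hpre : Pre_assign_targets n 0 edges) :
    (g2b n edges).1.getD (PKey.i v) [] = (adjOf edges v).reverse := by
  unfold g2b adjOf
  rw [s2_getD_int (pairsOf edges) (g1b n) v]
  · rw [show (g1b n).1.getD (PKey.i v) [] = [] from by
      unfold g1b; exact b1_getD_i (L n) _ v hv (L_nodup n)]
    simp
  · intro p hp
    rcases pairs_fst edges p hp with ⟨u, ⟨e, he, hue⟩, hp1⟩
    rw [hp1]
    unfold g1b
    apply b1_contains_i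
    rw [mem_L_iff]
    rcases hue with rfl | rfl
    · exact ⟨(hpre e he).1.1, (hpre e he).1.2⟩
    · exact ⟨(hpre e he).2.1, (hpre e he).2.2⟩

-- bLoop single-step lemmas
lemma bl_nil (G : Std.HashMap PKey (List PKey)) (f : Nat) (vis : PySem.Set PKey) :
    bLoop G (f + 1) [] vis = (false, vis) := by
  simp [bLoop]

lemma bl_pop (G : Std.HashMap PKey (List PKey)) (f : Nat) (rest : List (List PKey))
    (vis : PySem.Set PKey) : bLoop G (f + 1) ([] :: rest) vis = bLoop G f rest vis := by
  simp [bLoop]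

lemma bl_visit (G : Std.HashMap PKey (List PKey)) (f : Nat) (node : PKey) (frest : List PKey)
    (rest : List (List PKey)) (vis : PySem.Set PKey)
    (h : PySem.Set.contains vis node = false) (ht : node ≠ tK) :
    bLoop G (f + 1) ((node :: frest) :: rest) vis =
      bLoop G f ((G.getD node []).reverse :: frest :: rest) (PySem.Set.add vis node) := by
  simp only [bLoop]
  rw [h]
  simp [ht]

lemma bl_t (G : Std.HashMap PKey (List PKey)) (f : Nat) (frest : List PKey)
    (rest : List (List PKey)) (vis : PySem.Set PKey)
    (h : PySem.Set.contains vis tK = false) :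
    bLoop G (f + 1) ((tK :: frest) :: rest) vis = (true, PySem.Set.add vis tK) := by
  simp only [bLoop]
  rw [h]
  simp

-- B's main-loop traces
lemma bT_none (n : Int) (edges : List (Int × Int)) (hpre : Pre_assign_targets n 0 edges)
    (R : List Int) : ∀ (P : List Int) (fuel : Nat), L n = P ++ R →
    2 * R.length + 2 ≤ fuel → (∀ v ∈ R, epred edges v = false) →
    bLoop (g2b n edges).1 fuel [R.map PKey.i] (VL P) = (false, VL (P ++ R)) := by
  induction R with
  | nil =>
    intro P fuel _ hf _
    obtain ⟨f, rfl⟩ : ∃ f, fuel = f + 2 := ⟨fuel - 2, by omega⟩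
    rw [show (([] : List Int).map PKey.i) = ([] : List PKey) from rfl, bl_pop, bl_nil]
    simp
  | cons v R' ih =>
    intro P fuel hsplit hf hR
    obtain ⟨f, rfl⟩ : ∃ f, fuel = f + 2 := ⟨fuel - 2, by omega⟩
    have hvL : v ∈ L n := by rw [hsplit]; simp
    have hnd : (P ++ v :: R').Nodup := hsplit ▸ L_nodup n
    have hvP : v ∉ P := by
      rcases List.nodup_append.mp hnd with ⟨_, _, hdisj⟩
      intro hvp
      exact hdisj v hvp v (by simp) rfl
    simp only [List.map_cons]
    rw [bl_visit _ _ _ _ _ _ (cts_false _ _ (i_not_mem_VL P v hvP)) (by simp)]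
    rw [g2b_getD_int n edges v hvL hpre,
      (adj_nil_iff edges v).mpr (hR v (by simp))]
    simp only [List.reverse_nil]
    rw [bl_pop, VL_add P v hvP]
    rw [ih (P ++ [v]) f (by rw [hsplit]; simp) (by simp at hf ⊢; omega)
      (fun u hu => hR u (by simp [hu]))]
    simp

lemma bT_some (n : Int) (edges : List (Int × Int)) (hpre : Pre_assign_targets n 0 edges)
    (k : Int) (R2 : List Int) (w : Int) (rest : List PKey)
    (hadj : adjOf edges k = PKey.s (PySem.Int.toStr w) :: rest)
    (hw : 1 ≤ w) (hwn : w ≤ n)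
    (R1 : List Int) : ∀ (P : List Int) (fuel : Nat),
    L n = P ++ R1 ++ k :: R2 → 2 * R1.length + 3 ≤ fuel →
    (∀ v ∈ R1, epred edges v = false) →
    bLoop (g2b n edges).1 fuel [(R1 ++ k :: R2).map PKey.i] (VL P) =
      (true, VL (P ++ R1 ++ [k]) ++ [PKey.s (PySem.Int.toStr w), tK]) := by
  induction R1 with
  | nil =>
    intro P fuel hsplit hf _
    obtain ⟨f, rfl⟩ : ∃ f, fuel = f + 3 := ⟨fuel - 3, by omega⟩
    have hkL : k ∈ L n := by rw [hsplit]; simp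
    have hnd : (P ++ k :: R2).Nodup := by
      have := hsplit ▸ L_nodup n
      simpa using this
    have hkP : k ∉ P := by
      rcases List.nodup_append.mp hnd with ⟨_, _, hdisj⟩
      intro hkp
      exact hdisj k hkp k (by simp) rfl
    simp only [List.nil_append, List.map_cons]
    rw [bl_visit _ _ _ _ _ _ (cts_false _ _ (i_not_mem_VL P k hkP)) (by simp)]
    rw [g2b_getD_int n edges k hkL hpre, hadj, VL_add P k hkP]
    try simp only [List.reverse_reverse]
    have hswm : PKey.s (PySem.Int.toStr w) ∉ VL (P ++ [k]) := by
      unfold VL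
      simp only [List.mem_cons, List.mem_map]
      push_neg
      exact ⟨fun hh => toStr_ne_s w hw (PKey.s.inj hh), fun a _ => by simp⟩
    rw [bl_visit _ _ _ _ _ _ (cts_false _ _ hswm)
      (by simp only [ne_eq, PKey.s.injEq]; exact toStr_ne_t w hw)]
    rw [g2b_getD_str n edges w ((mem_L_iff n w).mpr ⟨hw, hwn⟩)]
    rw [padd _ _ hswm]
    have htm : tK ∉ VL (P ++ [k]) ++ [PKey.s (PySem.Int.toStr w)] := by
      unfold VL
      simp only [List.mem_append, List.mem_cons, List.mem_map, List.mem_singleton]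
      push_neg
      exact ⟨⟨by simp, fun a _ => by simp⟩,
        ⟨fun h => toStr_ne_t w hw (PKey.s.inj h).symm, by simp⟩⟩
    try simp only [List.reverse_singleton]
    rw [bl_t _ _ _ _ _ (cts_false _ _ htm)]
    rw [padd _ _ htm]
    simp [VL]
  | cons v R1' ih =>
    intro P fuel hsplit hf hR1
    obtain ⟨f, rfl⟩ : ∃ f, fuel = f + 2 := ⟨fuel - 2, by omega⟩
    have hvL : v ∈ L n := by rw [hsplit]; simp
    have hnd : (P ++ (v :: R1') ++ k :: R2).Nodup := hsplit ▸ L_nodup n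
    have hvP : v ∉ P := by
      have hnd2 : (P ++ (v :: R1' ++ k :: R2)).Nodup := by simpa using hnd
      rcases List.nodup_append.mp hnd2 with ⟨_, _, hdisj⟩
      intro hvp
      exact hdisj v hvp v (by simp) rfl
    simp only [List.cons_append, List.map_cons]
    rw [bl_visit _ _ _ _ _ _ (cts_false _ _ (i_not_mem_VL P v hvP)) (by simp)]
    rw [g2b_getD_int n edges v hvL hpre,
      (adj_nil_iff edges v).mpr (hR1 v (by simp))]
    simp only [List.reverse_nil]
    rw [bl_pop, VL_add P v hvP]
    rw [ih (P ++ [v]) f (by rw [hsplit]; simp) (by simp at hf ⊢; omega)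
      (fun u hu => hR1 u (by simp [hu]))]
    simp [List.append_assoc]

-- port B connection
lemma portB_eq (n : Int) (m : Int) (edges : List (Int × Int)) :
    assign_targets_alt n m edges =
      match bLoop (g2b n edges).1 (2 * (L n).length + 5)
          [((g2b n edges).1.getD sK []).reverse] (VL []) with
      | (true, vis) =>
        let targets : List Int := PySem.List.sorted (vis.filterMap inlProj) (fun x => x) false
        if (targets.length : Int) = n then
          String.intercalate "\n" (targets.map PySem.Int.toStr)
        else "Impossible"
      | (false, _) => "Impossible" := by
  unfold assign_targets_alt
  dsimp only
  rw [stage2_eq]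
  rfl

-- sublists of L n are strictly increasing
lemma prefix_pairwise (n k : Int) (R1 R2 : List Int) (hsplit : L n = R1 ++ k :: R2) :
    (R1 ++ [k]).Pairwise (fun a b => a < b) := by
  have hLp : (L n).Pairwise (fun a b => a < b) := by
    unfold L
    exact PySem.List.pairwise_lt_pyRange_one 1 (n + 1)
  have hsub : (R1 ++ [k]).Sublist (L n) := by
    rw [hsplit]
    apply List.Sublist.append_left
    simp
  exact hLp.sublist hsub

-- ---- B = C ----
lemma B_eq_C (n : Int) (m : Int) (edges : List (Int × Int))
    (hpre : Pre_assign_targets n 0 edges) : assign_targets_alt n m edges = C n edges := by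
  rw [portB_eq]
  have hS : ((g2b n edges).1.getD sK []).reverse = (L n).map PKey.i := by
    rw [g2b_getD_s]
    simp
  rw [hS]
  cases hf : (L n).find? (fun v => epred edges v) with
  | none =>
    have hall : ∀ v ∈ L n, epred edges v = false := by
      intro v hv
      exact bfalse (List.find?_eq_none.mp hf v hv)
    rw [bT_none n edges hpre (L n) [] _ (by simp) (by omega) hall]
    unfold C
    rw [hf]
  | some k =>
    obtain ⟨hk, R1, R2, hsplit, hR1⟩ := find?_split _ (L n) k hf
    have hkL : k ∈ L n := by rw [hsplit]; simp
    have hkb := (mem_L_iff n k).mp hkL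
    cases hadj : adjOf edges k with
    | nil => rw [(adj_nil_iff edges k).mp hadj] at hk; simp at hk
    | cons x rest =>
    obtain ⟨w, ⟨e, he, hwe⟩, rfl⟩ := adj_mem edges k x (by rw [hadj]; simp)
    have hwb : 1 ≤ w ∧ w ≤ n := by
      rcases hwe with rfl | rfl
      · exact ⟨(hpre e he).1.1, (hpre e he).1.2⟩
      · exact ⟨(hpre e he).2.1, (hpre e he).2.2⟩
    have hlenR1 : R1.length + 1 ≤ (L n).length := by
      rw [hsplit]
      simp only [List.length_append, List.length_cons]
      omega
    rw [show (L n).map PKey.i = (R1 ++ k :: R2).map PKey.i from by rw [hsplit]]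
    rw [bT_some n edges hpre k R2 w rest hadj hwb.1 hwb.2 R1 [] _
      (by simpa using hsplit) (by omega) hR1]
    dsimp only
    have hfm : (VL ([] ++ R1 ++ [k]) ++ [PKey.s (PySem.Int.toStr w), tK]).filterMap inlProj
        = R1 ++ [k] := by
      unfold VL
      simp [List.filterMap_append, List.filterMap_cons, inlProj,
        List.filterMap_map, Function.comp_def]
    rw [hfm]
    have hsorted : PySem.List.sorted (R1 ++ [k]) (fun x => x) false = R1 ++ [k] :=
      PySem.List.sorted_eq_of_perm_of_pairwise_lt _ _ _ (List.Perm.refl _)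
        (prefix_pairwise n k R1 R2 hsplit)
    rw [hsorted]
    obtain ⟨hlen, hR2nil⟩ := klen n k R1 R2 hsplit hkb.1 hkb.2
    rw [hlen]
    unfold C
    rw [hf]
    dsimp only
    by_cases hkn : k = n
    · rw [if_pos hkn, if_pos hkn]
      rw [hsplit, hR2nil hkn]
    · rw [if_neg hkn, if_neg hkn]

-- ===== VERDICT (by name: the statement is the Claim_ definition above) =====
theorem assign_targets_spec : Claim_equal_assign_targets := by
  intro n m edges _hdom hpre
  unfold Spec_assign_targets
  have hpre' : Pre_assign_targets n 0 edges := hpre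
  rw [A_eq_C n m edges hpre', B_eq_C n m edges hpre']
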